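-- pv_equiv track=rewrite | github.com/Ausbxuse/nixos-config | pkgs/minecraft/bootstrap.py | pick_version
-- ===== SOURCE A (Python) =====
-- def pick_version(versions):
--     rank = {"release": 0, "beta": 1, "alpha": 2}
--     best_rank = min(rank.get(version.get("version_type"), 9) for version in versions)
--     candidates = [
--         version
--         for version in versions
--         if rank.get(version.get("version_type"), 9) == best_rank
--     ]
--     return max(candidates, key=lambda version: version.get("date_published", ""))
-- ===== SOURCE B (Python) =====
-- def pick_version(versions):
--     rank = {"release": 0, "beta": 1, "alpha": 2}
--     best = None
--     for v in versions:
--         r = rank.get(v.get("version_type"), 9)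
--         d = v.get("date_published", "")
--         if best is None or r < best[0] or (r == best[0] and d > best[1]):
--             best = (r, d, v)
--     if best is None:
--         raise ValueError("pick_version() arg is an empty sequence")
--     return best[2]
-- ===== Notes on version B (the rewrite author's own statement) =====
-- stated objective: alternative
-- what changed: Replaces A's three staged passes (min of ranks, filter to best-rank candidates, max by date) with one explicit loop carrying a (rank, date, element) accumulator that is updated when the rank strictly improves or ties with a strictly later date, reproducing A's choice and first-wins tie behaviour in a single pass.
import Mathlib
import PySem

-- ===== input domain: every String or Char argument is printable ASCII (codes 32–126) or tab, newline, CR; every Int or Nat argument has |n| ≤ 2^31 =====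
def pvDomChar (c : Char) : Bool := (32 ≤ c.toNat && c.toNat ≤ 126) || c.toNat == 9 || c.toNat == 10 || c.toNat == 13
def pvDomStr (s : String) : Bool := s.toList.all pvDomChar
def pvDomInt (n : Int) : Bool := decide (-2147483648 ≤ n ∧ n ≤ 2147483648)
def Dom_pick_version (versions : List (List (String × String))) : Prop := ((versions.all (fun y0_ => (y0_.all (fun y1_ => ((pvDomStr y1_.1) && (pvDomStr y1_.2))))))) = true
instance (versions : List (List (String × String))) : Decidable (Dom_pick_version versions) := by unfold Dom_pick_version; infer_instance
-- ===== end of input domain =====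

-- B replaces A's three staged passes (min rank / filter / max date) by a single
-- explicit loop with a (rank, date, element) accumulator — a different decomposition.

-- ===== PORT A =====
-- rank.get(version.get("version_type"), 9): the inner .get returns None when the key
-- is absent, and rank.get(None, 9) = 9 since None is not a key of rank — exact.
def pvRankKey (v : List (String × String)) : Int :=
  match PySem.Dict.get? (PySem.Dict.mk v) "version_type" with
  | some s => PySem.Dict.getD (PySem.Dict.mk [("release", (0 : Int)), ("beta", 1), ("alpha", 2)]) s 9
  | none => 9

-- version.get("date_published", "")
def pvDateKey (v : List (String × String)) : String :=
  PySem.Dict.getD (PySem.Dict.mk v) "date_published" ""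

def pick_version (versions : List (List (String × String))) : List (String × String) :=
  match PySem.List.min? (versions.map pvRankKey) (fun r => r) with
  | none => []          -- min() of an empty generator raises ValueError; excluded by Pre_
  | some best_rank =>
    match PySem.List.max? (versions.filter (fun v => pvRankKey v == best_rank)) pvDateKey with
    | some m => m
    | none => []        -- unreachable: best_rank is attained, so candidates ≠ []

-- ===== PORT B =====
-- one iteration of B's loop: accumulator = None | (best rank, best date, best element)
def pvStep (acc : Option (Int × String × List (String × String)))
    (v : List (String × String)) : Option (Int × String × List (String × String)) :=
  let r : Int :=
    match PySem.Dict.get? (PySem.Dict.mk v) "version_type" with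
    | some s => PySem.Dict.getD (PySem.Dict.mk [("release", (0 : Int)), ("beta", 1), ("alpha", 2)]) s 9
    | none => 9
  let d := PySem.Dict.getD (PySem.Dict.mk v) "date_published" ""
  match acc with
  | none => some (r, d, v)
  | some (br, bd, bv) =>
    if r < br ∨ (r = br ∧ bd < d) then some (r, d, v) else some (br, bd, bv)

def pick_version_alt (versions : List (List (String × String))) : List (String × String) :=
  match versions.foldl pvStep none with
  | some (_, _, bv) => bv
  | none => []          -- best is None: B raises ValueError; excluded by Pre_

-- ===== PRECONDITION & SPEC =====
-- Pre_ excludes only the empty list, on which A (min of an empty generator) raises ValueError.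
def Pre_pick_version (versions : List (List (String × String))) : Prop := versions ≠ []
instance (versions : List (List (String × String))) : Decidable (Pre_pick_version versions) := by unfold Pre_pick_version; infer_instance

def pvWitness_pick_version : (List (List (String × String))) :=
  [[("version_type", "release"), ("date_published", "2024-01-01")]]

def Spec_pick_version (versions : List (List (String × String))) (out : List (String × String)) : Prop := out = pick_version_alt versions
instance (versions : List (List (String × String))) (out : List (String × String)) : Decidable (Spec_pick_version versions out) := by unfold Spec_pick_version; infer_instance

-- ===== CLAIM (what is proved, stated in full; the proofs are below) =====
def Claim_equal_pick_version : Prop := ∀ (versions : List (List (String × String))), Dom_pick_version versions → Pre_pick_version versions → Spec_pick_version versions (pick_version versions)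

-- ===== LEMMAS AND PROOFS =====

-- pvStep written with A's key helpers (same expressions, definitional)
lemma pvStep_eq (acc : Option (Int × String × List (String × String)))
    (v : List (String × String)) :
    pvStep acc v =
      match acc with
      | none => some (pvRankKey v, pvDateKey v, v)
      | some (br, bd, bv) =>
        if pvRankKey v < br ∨ (pvRankKey v = br ∧ bd < pvDateKey v)
        then some (pvRankKey v, pvDateKey v, v) else some (br, bd, bv) := rfl

-- snoc step of min? with the identity key
lemma pv_min?_snoc (l : List Int) (a : Int) :
    PySem.List.min? (l ++ [a]) (fun r => r) =
      match PySem.List.min? l (fun r => r) with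
      | none => some a
      | some b => if a < b then some a else some b := by
  simp only [PySem.List.min?, List.foldl_append, List.foldl_cons, List.foldl_nil]
  split <;> rename_i heq <;> rw [heq]

-- snoc step of max? (key = pvDateKey)
lemma pv_max?_snoc (l : List (List (String × String))) (x : List (String × String)) :
    PySem.List.max? (l ++ [x]) pvDateKey =
      match PySem.List.max? l pvDateKey with
      | none => some x
      | some m => if pvDateKey m < pvDateKey x then some x else some m := by
  simp only [PySem.List.max?, List.foldl_append, List.foldl_cons, List.foldl_nil]
  split <;> rename_i heq <;> rw [heq]

-- the central invariant: B's accumulator after the whole loop is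
-- (best rank, date of A's winner, A's winner)
lemma pv_main (xs : List (List (String × String))) (b : Int)
    (h : PySem.List.min? (xs.map pvRankKey) (fun r => r) = some b) :
    xs.foldl pvStep none
      = Option.map (fun m => (b, pvDateKey m, m))
          (PySem.List.max? (xs.filter (fun v => pvRankKey v == b)) pvDateKey) := by
  induction xs using List.reverseRecOn generalizing b with
  | nil => simp [PySem.List.min?] at h
  | append_singleton l x ih =>
    rw [List.map_append, List.map_cons, List.map_nil, pv_min?_snoc] at h
    rw [List.foldl_append, List.foldl_cons, List.foldl_nil, List.filter_append]
    cases hm : PySem.List.min? (l.map pvRankKey) (fun r => r) with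
    | none =>
      have hl : l = [] := by
        have := (PySem.List.min?_eq_none_iff (l.map pvRankKey) (fun r => r)).mp hm
        simpa using this
      subst hl
      rw [hm] at h
      simp only at h
      obtain rfl : pvRankKey x = b := Option.some.inj h
      simp [pvStep_eq, PySem.List.max?, List.filter]
    | some b0 =>
      rw [hm] at h
      simp only at h
      -- candidates of l are nonempty: b0 is attained in l
      obtain ⟨y, hy, hyb⟩ : ∃ y ∈ l, pvRankKey y = b0 := by
        have := PySem.List.min?_mem hm
        simpa using this
      have hne : l.filter (fun v => pvRankKey v == b0) ≠ [] := by
        intro hcon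
        have : y ∈ l.filter (fun v => pvRankKey v == b0) := by
          simp [List.mem_filter, hy, hyb]
        rw [hcon] at this; exact absurd this (List.not_mem_nil)
      obtain ⟨m, hmax⟩ : ∃ m, PySem.List.max? (l.filter (fun v => pvRankKey v == b0)) pvDateKey = some m := by
        cases hq : PySem.List.max? (l.filter (fun v => pvRankKey v == b0)) pvDateKey with
        | none => exact absurd ((PySem.List.max?_eq_none_iff _ _).mp hq) hne
        | some m => exact ⟨m, rfl⟩
      have hmin : ∀ z ∈ l, b0 ≤ pvRankKey z := by
        intro z hz
        have := PySem.List.min?_isMin hm (pvRankKey z) (List.mem_map_of_mem hz)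
        simpa using this
      rw [ih b0 hm, hmax, pvStep_eq]
      dsimp only [Option.map]
      by_cases hlt : pvRankKey x < b0
      · -- new strict minimum: candidates collapse to [x]
        rw [if_pos hlt] at h
        obtain rfl : pvRankKey x = b := Option.some.inj h
        have hfe : l.filter (fun v => pvRankKey v == pvRankKey x) = [] := by
          apply List.filter_eq_nil_iff.mpr
          intro z hz
          have := hmin z hz
          simp only [beq_iff_eq]
          omega
        rw [hfe]
        rw [if_pos (Or.inl hlt)]
        simp [PySem.List.max?]
      · rw [if_neg hlt] at h
        obtain rfl : b0 = b := Option.some.inj h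
        by_cases heq : pvRankKey x = b0
        · -- equal rank: the loop compares dates, exactly as A's max over candidates
          have hfx : List.filter (fun v => pvRankKey v == b0) [x] = [x] := by
            simp [heq]
          rw [hfx, pv_max?_snoc, hmax]
          by_cases hd : pvDateKey m < pvDateKey x
          · rw [if_pos (Or.inr ⟨heq, hd⟩)]
            simp [heq, hd]
          · have hcond : ¬ (pvRankKey x < b0 ∨ (pvRankKey x = b0 ∧ pvDateKey m < pvDateKey x)) := by
              intro hc
              rcases hc with h1 | ⟨_, h2⟩
              · exact hlt h1
              · exact hd h2
            rw [if_neg hcond]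
            simp [hd]
        · -- strictly worse rank: x is discarded on both sides
          have hfx : List.filter (fun v => pvRankKey v == b0) [x] = [] := by
            simp [heq]
          have hcond : ¬ (pvRankKey x < b0 ∨ (pvRankKey x = b0 ∧ pvDateKey m < pvDateKey x)) := by
            intro hc
            rcases hc with h1 | ⟨h2, _⟩
            · exact hlt h1
            · exact heq h2
          rw [hfx, List.append_nil, hmax, if_neg hcond]

-- ===== VERDICT (by name: the statement is the Claim_ definition above) =====
theorem pick_version_spec : Claim_equal_pick_version := by
  intro versions hdom hpre
  unfold Spec_pick_version pick_version pick_version_alt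
  cases hm : PySem.List.min? (versions.map pvRankKey) (fun r => r) with
  | none =>
    exact absurd (by simpa using (PySem.List.min?_eq_none_iff _ _).mp hm) hpre
  | some b =>
    dsimp only
    rw [pv_main versions b hm]
    cases PySem.List.max? (versions.filter (fun v => pvRankKey v == b)) pvDateKey <;> rfl
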